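-- pv_equiv track=rewrite | github.com/ROCm/TheRock | build_tools/github_actions/detect_external_projects.py | get_changed_subtrees
-- ===== SOURCE A (Python) =====
-- from typing import List, Optional, Set
--
-- def get_changed_subtrees(
--     modified_paths: List[str], subtree_to_project_map: dict
-- ) -> Set[str]:
--     """Extracts subtree paths from modified files that match known project directories.
--
--     Args:
--         modified_paths: List of file paths changed in the commit/PR
--         subtree_to_project_map: Mapping of subtree paths to project names
--
--     Returns:
--         Set of subtree paths that were changed and are in the project map
--     """
--     changed_subtrees = set()
--
--     for path in modified_paths:
--         # Check if this path matches any known subtree prefix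
--         for subtree in subtree_to_project_map.keys():
--             if path.startswith(subtree + "/") or path == subtree:
--                 changed_subtrees.add(subtree)
--                 break
--
--     return changed_subtrees
-- ===== SOURCE B (Python) =====
-- def _candidates(path):
--     """All strings s such that path == s or path.startswith(s + "/"):
--     exactly the prefixes of path ending right before a '/', plus path itself."""
--     cands = [path[:i] for i, ch in enumerate(path) if ch == "/"]
--     cands.append(path)
--     return cands
--
-- def get_changed_subtrees(modified_paths, subtree_to_project_map):
--     keys = list(subtree_to_project_map)
--     index = {k: i for i, k in enumerate(keys)}
--     changed = set()
--     for path in modified_paths: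
--         idxs = [index[c] for c in _candidates(path) if c in index]
--         if idxs:
--             changed.add(keys[min(idxs)])
--     return changed
-- ===== Notes on version B (the rewrite author's own statement) =====
-- stated objective: faster
-- what changed: Instead of scanning every subtree key for each path (O(P*S) prefix tests), B builds a hash index of the subtree keys once and, for each path, enumerates the path's own '/'-delimited prefixes and looks each up in the index, picking the match with the smallest dict-order position (which reproduces A's break-on-first-key choice).
import Mathlib
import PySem

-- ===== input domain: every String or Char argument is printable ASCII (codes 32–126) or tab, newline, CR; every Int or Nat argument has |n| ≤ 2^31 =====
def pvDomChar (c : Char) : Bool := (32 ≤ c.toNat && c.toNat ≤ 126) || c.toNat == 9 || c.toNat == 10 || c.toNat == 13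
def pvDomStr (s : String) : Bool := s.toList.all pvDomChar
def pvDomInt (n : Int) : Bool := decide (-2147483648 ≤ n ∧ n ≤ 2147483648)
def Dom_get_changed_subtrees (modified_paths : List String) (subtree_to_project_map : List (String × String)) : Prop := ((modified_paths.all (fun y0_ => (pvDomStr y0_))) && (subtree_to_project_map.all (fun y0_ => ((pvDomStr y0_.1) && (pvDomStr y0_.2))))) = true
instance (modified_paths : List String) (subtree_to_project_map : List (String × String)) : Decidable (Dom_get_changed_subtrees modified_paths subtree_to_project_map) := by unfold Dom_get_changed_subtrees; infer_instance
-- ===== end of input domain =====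

-- B replaces A's per-path scan over all subtree keys with one hash index of the keys plus
-- per-path enumeration of the path's own '/'-delimited prefixes (objective: faster).

-- ===== PORT A =====
-- 'path.startswith(subtree + "/") or path == subtree' (string concat ported exactly as
-- list-of-chars append under PySem.Chars.startswith)
def pvCondA (path subtree : String) : Bool :=
  PySem.Chars.startswith path.toList (subtree.toList ++ ['/']) || path == subtree

-- the inner 'for subtree in subtree_to_project_map.keys(): … break' loop
def pvInnerA (path : String) : List String → PySem.Set String → PySem.Set String
  | [], acc => acc
  | k :: rest, acc => if pvCondA path k then PySem.Set.add acc k else pvInnerA path rest acc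

def get_changed_subtrees (modified_paths : List String) (subtree_to_project_map : List (String × String)) : List String :=
  let keys := (PySem.Dict.ofList subtree_to_project_map).keys
  modified_paths.foldl (fun changed path => pvInnerA path keys changed) PySem.Set.empty

-- ===== PORT B =====
-- Source B _candidates: [path[:i] for i, ch in enumerate(path) if ch == '/'] + [path]
def pvCands (path : String) : List String :=
  ((PySem.List.enumerate path.toList 0).filterMap
    (fun p => if p.2 == '/' then some (String.ofList (PySem.List.slice path.toList none (some p.1))) else none))
  ++ [path]

def get_changed_subtrees_alt (modified_paths : List String) (subtree_to_project_map : List (String × String)) : List String :=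
  let keys := (PySem.Dict.ofList subtree_to_project_map).keys
  let index := (PySem.List.enumerate keys 0).foldl (fun d p => d.insert p.2 p.1) (PySem.Dict.empty : PySem.Dict String Int)
  modified_paths.foldl (fun changed path =>
    let idxs := (pvCands path).filterMap (fun c => index.get? c)
    match PySem.List.min? idxs (fun x => x) with
    | none => changed
    | some m0 => PySem.Set.add changed (PySem.List.pyGetD keys m0 "")) PySem.Set.empty

-- ===== PRECONDITION & SPEC =====
def Spec_get_changed_subtrees (modified_paths : List String) (subtree_to_project_map : List (String × String)) (out : List String) : Prop := out = get_changed_subtrees_alt modified_paths subtree_to_project_map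
instance (modified_paths : List String) (subtree_to_project_map : List (String × String)) (out : List String) : Decidable (Spec_get_changed_subtrees modified_paths subtree_to_project_map out) := by unfold Spec_get_changed_subtrees; infer_instance

-- ===== CLAIM (what is proved, stated in full; the proofs are below) =====
def Claim_equal_get_changed_subtrees : Prop := ∀ (modified_paths : List String) (subtree_to_project_map : List (String × String)), Dom_get_changed_subtrees modified_paths subtree_to_project_map → Spec_get_changed_subtrees modified_paths subtree_to_project_map (get_changed_subtrees modified_paths subtree_to_project_map)

-- ===== LEMMAS AND PROOFS =====

-- A's match condition holds exactly for the candidate prefixes B enumerates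
theorem pv_prefix_slash_iff (cs ks : List Char) :
    (ks ++ ['/']) <+: cs ↔ ∃ m, ∃ _ : m < cs.length, cs[m] = '/' ∧ cs.take m = ks := by
  constructor
  · intro h
    have hlen : ks.length + 1 ≤ cs.length := by simpa using h.length_le
    refine ⟨ks.length, by omega, ?_, ?_⟩
    · have := h.getElem (i := ks.length) (by simp)
      simpa using this.symm
    · have hk : ks <+: cs := (List.prefix_append ks ['/']).trans h
      exact (List.prefix_iff_eq_take.mp hk).symm
  · rintro ⟨m, hm, hc, ht⟩
    have heq : ks ++ ['/'] = cs.take (m + 1) := by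
      rw [List.take_add_one, ht, List.getElem?_eq_getElem hm, hc]
      simp
    rw [heq]
    exact List.take_prefix _ _

theorem pv_cond_iff_mem_cands (path k : String) :
    pvCondA path k = true ↔ k ∈ pvCands path := by
  unfold pvCondA pvCands
  simp only [Bool.or_eq_true, beq_iff_eq, List.mem_append, List.mem_singleton,
    List.mem_filterMap, PySem.Chars.startswith_iff, PySem.List.mem_enumerate_iff]
  rw [pv_prefix_slash_iff]
  constructor
  · rintro (⟨m, hm, hc, ht⟩ | rfl)
    · left
      refine ⟨((m : Int), path.toList[m]), ⟨m, hm, by simp⟩, ?_⟩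
      simp [hc, PySem.List.slice_to_natCast, ht]
    · right; rfl
  · rintro (⟨⟨i, c⟩, ⟨m, hm, hp⟩, hf⟩ | rfl)
    · simp only [Prod.mk.injEq, zero_add] at hp
      obtain ⟨rfl, rfl⟩ := hp
      by_cases hc : path.toList[m] = '/'
      · simp only [hc, if_true, Option.some.injEq] at hf
        left
        refine ⟨m, hm, hc, ?_⟩
        rw [← hf]
        simp [PySem.List.slice_to_natCast]
      · simp [hc] at hf
    · right; rfl

-- the inner loop of A is find?-then-add
theorem pv_innerA_eq_find (path : String) (keys : List String) (acc : PySem.Set String) :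
    pvInnerA path keys acc =
      match keys.find? (pvCondA path) with
      | some k => PySem.Set.add acc k
      | none => acc := by
  induction keys with
  | nil => simp [pvInnerA, List.find?]
  | cons k rest ih =>
    by_cases h : pvCondA path k
    · simp [pvInnerA, List.find?, h]
    · simp [pvInnerA, List.find?, h, ih]

-- the index dict {k: i for i, k in enumerate(keys)} looks up the position of a key
theorem pv_index_get (keys : List String) (hn : keys.Nodup) (c : String) :
    ((PySem.List.enumerate keys 0).foldl (fun d p => d.insert p.2 p.1)
        (PySem.Dict.empty : PySem.Dict String Int)).get? c
      = Option.map (fun n : Nat => (n : Int)) (PySem.List.index? keys c) := by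
  have hitems : ((PySem.List.enumerate keys 0).foldl (fun d p => d.insert p.2 p.1)
      (PySem.Dict.empty : PySem.Dict String Int)).items
      = (PySem.List.enumerate keys 0).map (fun p => (p.2, p.1)) := by
    have := PySem.Dict.items_foldl_insert_fresh (PySem.List.enumerate keys 0)
      (fun p => p.2) (fun p => p.1) (PySem.Dict.empty : PySem.Dict String Int)
      (by intro a _; simp) (by rw [PySem.List.map_snd_enumerate]; exact hn)
    simpa using this
  have hkeys : ((PySem.List.enumerate keys 0).foldl (fun d p => d.insert p.2 p.1)
      (PySem.Dict.empty : PySem.Dict String Int)).keys = keys := by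
    simp only [PySem.Dict.keys, hitems, List.map_map]
    have : ((fun (p : String × Int) => p.1) ∘ fun (p : Int × String) => (p.2, p.1))
        = fun (p : Int × String) => p.2 := rfl
    rw [this, PySem.List.map_snd_enumerate]
  cases hi : PySem.List.index? keys c with
  | none =>
    have hnm : c ∉ keys := (PySem.List.index?_eq_none_iff keys c).mp hi
    have hgn : ((PySem.List.enumerate keys 0).foldl (fun d p => d.insert p.2 p.1)
        (PySem.Dict.empty : PySem.Dict String Int)).get? c = none := by
      rw [PySem.Dict.get?_eq_none_iff_not_mem_keys, hkeys]; exact hnm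
    rw [hgn]
    rfl
  | some k =>
    obtain ⟨hk, hek, _⟩ := PySem.List.getElem_of_index?_eq_some hi
    have hmem : (c, (k : Int)) ∈ ((PySem.List.enumerate keys 0).map (fun p => (p.2, p.1))) := by
      simp only [List.mem_map, PySem.List.mem_enumerate_iff]
      exact ⟨((k : Int), keys[k]), ⟨k, hk, by simp⟩, by simp [hek]⟩
    have hnd : ((PySem.List.enumerate keys 0).foldl (fun d p => d.insert p.2 p.1)
        (PySem.Dict.empty : PySem.Dict String Int)).keys.Nodup := by rw [hkeys]; exact hn
    have hmem' : (c, (k : Int)) ∈ ((PySem.List.enumerate keys 0).foldl (fun d p => d.insert p.2 p.1)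
        (PySem.Dict.empty : PySem.Dict String Int)).items := by rw [hitems]; exact hmem
    have hres := PySem.Dict.get?_of_mem_items _ hmem' hnd
    rw [hres]
    rfl

-- min of a nonempty Int list with an explicit minimum
theorem pv_min?_eq_some (xs : List Int) (a : Int) (h1 : a ∈ xs) (h2 : ∀ y ∈ xs, a ≤ y) :
    PySem.List.min? xs (fun x => x) = some a := by
  cases hm : PySem.List.min? xs (fun x => x) with
  | none =>
    rw [PySem.List.min?_eq_none_iff] at hm
    subst hm; simp at h1
  | some m =>
    have hmem := PySem.List.min?_mem hm
    have h3 : m ≤ a := PySem.List.min?_isMin hm a h1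
    have h4 : a ≤ m := h2 m hmem
    exact congrArg some (le_antisymm h3 h4)

-- per-path: A's first matching key is B's minimum-index candidate
theorem pv_body_eq (keys : List String) (hn : keys.Nodup) (path : String) (acc : PySem.Set String) :
    pvInnerA path keys acc =
      (match PySem.List.min? ((pvCands path).filterMap (fun c =>
          ((PySem.List.enumerate keys 0).foldl (fun d p => d.insert p.2 p.1)
            (PySem.Dict.empty : PySem.Dict String Int)).get? c)) (fun x => x) with
       | none => acc
       | some m0 => PySem.Set.add acc (PySem.List.pyGetD keys m0 "")) := by
  rw [pv_innerA_eq_find]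
  cases hf : keys.find? (pvCondA path) with
  | none =>
    have hnone : ∀ c ∈ pvCands path,
        ((PySem.List.enumerate keys 0).foldl (fun d p => d.insert p.2 p.1)
          (PySem.Dict.empty : PySem.Dict String Int)).get? c = none := by
      intro c hc
      rw [pv_index_get keys hn c]
      cases hi : PySem.List.index? keys c with
      | none => rfl
      | some j =>
        obtain ⟨hj, hej, _⟩ := PySem.List.getElem_of_index?_eq_some hi
        have hckeys : c ∈ keys := hej ▸ List.getElem_mem hj
        have := List.find?_eq_none.mp hf c hckeys
        rw [pv_cond_iff_mem_cands] at this
        exact absurd hc this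
    rw [List.filterMap_eq_nil_iff.mpr hnone]
    rfl
  | some k =>
    obtain ⟨hck, pre, suf, hsplit, hpre⟩ := List.find?_eq_some_iff_append.mp hf
    have hknotpre : k ∉ pre := by
      intro hkp
      have h2 := hpre k hkp
      rw [hck] at h2
      simp at h2
    have hidx : PySem.List.index? keys k = some pre.length := by
      rw [PySem.List.index?_eq_some_iff]
      exact ⟨pre, suf, hsplit, rfl, hknotpre⟩
    have hgetk : ((PySem.List.enumerate keys 0).foldl (fun d p => d.insert p.2 p.1)
        (PySem.Dict.empty : PySem.Dict String Int)).get? k = some (pre.length : Int) := by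
      rw [pv_index_get keys hn k, hidx]; rfl
    have hkmem : (pre.length : Int) ∈ (pvCands path).filterMap (fun c =>
        ((PySem.List.enumerate keys 0).foldl (fun d p => d.insert p.2 p.1)
          (PySem.Dict.empty : PySem.Dict String Int)).get? c) := by
      rw [List.mem_filterMap]
      exact ⟨k, (pv_cond_iff_mem_cands path k).mp hck, hgetk⟩
    have hmin : ∀ y ∈ (pvCands path).filterMap (fun c =>
        ((PySem.List.enumerate keys 0).foldl (fun d p => d.insert p.2 p.1)
          (PySem.Dict.empty : PySem.Dict String Int)).get? c), (pre.length : Int) ≤ y := by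
      intro y hy
      rw [List.mem_filterMap] at hy
      obtain ⟨c, hc, hgc⟩ := hy
      rw [pv_index_get keys hn c] at hgc
      cases hi : PySem.List.index? keys c with
      | none => rw [hi] at hgc; exact absurd hgc (by simp)
      | some j =>
        rw [hi] at hgc
        have hgc2 : ((j : Nat) : Int) = y := by simpa using hgc
        subst hgc2
        obtain ⟨hj, hej, _⟩ := PySem.List.getElem_of_index?_eq_some hi
        by_contra hlt
        rw [not_le] at hlt
        have hjlt : j < pre.length := by exact_mod_cast hlt
        have hcin : c ∈ pre := by
          have hkj : keys[j]'hj = pre[j]'hjlt := by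
            simp only [hsplit]
            exact List.getElem_append_left hjlt
          rw [← hej, hkj]
          exact List.getElem_mem hjlt
        have hnc := hpre c hcin
        have hcc : pvCondA path c = true := (pv_cond_iff_mem_cands path c).mpr hc
        simp [hcc] at hnc
    rw [pv_min?_eq_some _ _ hkmem hmin]
    have hget : PySem.List.pyGetD keys ((pre.length : Int)) "" = k := by
      rw [PySem.List.pyGetD_natCast, hsplit]
      simp [List.getD]
    show PySem.Set.add acc k = PySem.Set.add acc (PySem.List.pyGetD keys ((pre.length : Int)) "")
    rw [hget]

-- ===== VERDICT (by name: the statement is the Claim_ definition above) =====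
theorem get_changed_subtrees_spec : Claim_equal_get_changed_subtrees := by
  intro modified_paths subtree_to_project_map _
  unfold Spec_get_changed_subtrees get_changed_subtrees get_changed_subtrees_alt
  have hn := PySem.Dict.nodup_keys_ofList subtree_to_project_map
  simp only []
  congr 1
  funext acc path
  exact pv_body_eq _ hn path acc
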